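-- pv_equiv track=rewrite | github.com/singingknight/adventOfCode | 2020/day06.py | buildGroupsAll
-- ===== SOURCE A (Python) =====
-- def buildGroupsAll(lines):
--     groups = []
--     group = None
--     for line in lines:
--         if line == '':
--             group = None
--             continue
--         person = set()
--         for q in line:
--             person.add(q)
--         if group == None:
--             group = set(person)
--             groups.append(group)
--         for q in group.difference(person):
--             group.remove(q)
--     return groups
-- ===== SOURCE B (Python) =====
-- def buildGroupsAll(lines):
--     # Two-phase: split lines into groups, then intersect each group's answer sets.
--     groups = []
--     current = []
--     for line in lines:
--         if line == '':
--             if current: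
--                 groups.append(current)
--                 current = []
--         else:
--             current.append(line)
--     if current:
--         groups.append(current)
--     result = []
--     for g in groups:
--         s = set(g[0])
--         for line in g[1:]:
--             s &= set(line)
--         result.append(s)
--     return result
-- ===== Notes on version B (the rewrite author's own statement) =====
-- stated objective: simpler
-- what changed: A interleaves group construction with incremental in-place set intersection on the mutable set it already appended to the output; B first splits the lines into groups in one pass, then computes each group's answer as a fold of set intersections, with no aliasing or mutation of appended results.
import Mathlib
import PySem

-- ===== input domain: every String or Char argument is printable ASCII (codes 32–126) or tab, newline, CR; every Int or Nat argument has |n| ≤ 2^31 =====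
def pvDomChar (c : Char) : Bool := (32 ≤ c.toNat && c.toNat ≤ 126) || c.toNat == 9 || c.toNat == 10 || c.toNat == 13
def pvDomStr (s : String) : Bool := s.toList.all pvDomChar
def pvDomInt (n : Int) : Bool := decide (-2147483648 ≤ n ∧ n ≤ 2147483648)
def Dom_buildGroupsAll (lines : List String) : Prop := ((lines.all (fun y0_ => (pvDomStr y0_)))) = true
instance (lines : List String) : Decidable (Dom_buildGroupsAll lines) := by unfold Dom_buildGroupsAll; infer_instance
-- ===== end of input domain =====

-- B replaces A's interleaved, mutation-by-aliasing incremental intersection by a split-into-groups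
-- pass followed by a per-group fold of set intersections (objective: simpler decomposition).
-- Both Pythons return sets; set ITERATION order never reaches the result, so they are ported as
-- PySem.Set values (insertion-ordered distinct lists), compared as lists.

-- ===== PORT A =====
-- set() built by 'for q in line: person.add(q)': distinct one-char strings, first-occurrence order
def charSet (line : String) : PySem.Set String :=
  PySem.Set.ofList (line.toList.map (fun c => String.ofList [c]))

-- One iteration of A's loop. Python appends the freshly created 'group' set to 'groups' and keeps
-- mutating that same object; this aliasing is modeled exactly by keeping the current group in the
-- second component and moving it into the finished list when it is closed by a blank line.
-- 'group.remove(q)' always has q ∈ group here, so it is exactly Set.discard; the removal loop's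
-- result does not depend on the set-iteration order of the difference.
def stepA (st : List (List String) × Option (List String)) (line : String) :
    List (List String) × Option (List String) :=
  if line = "" then (st.1 ++ st.2.toList, none)
  else
    let person := charSet line
    let group := match st.2 with
      | none => person
      | some g => g
    let group := (PySem.Set.diff group person).foldl (fun g q => PySem.Set.discard g q) group
    (st.1, some group)

def buildGroupsAll (lines : List String) : List (List String) :=
  let st := lines.foldl stepA ([], none)
  st.1 ++ st.2.toList

-- ===== PORT B =====
-- phase 1: partition the lines into groups (blank line closes the current group)
def stepB (st : List (List String) × List String) (line : String) :
    List (List String) × List String :=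
  if line = "" then (if st.2 = [] then st else (st.1 ++ [st.2], []))
  else (st.1, st.2 ++ [line])

def splitGroups (lines : List String) : List (List String) × List String :=
  lines.foldl stepB ([], [])

-- phase 2: one group's answer = intersection of its lines' character sets
def groupAnswer (g : List String) : PySem.Set String :=
  match g with
  | [] => []
  | l :: rest => rest.foldl (fun s line => PySem.Set.inter s (charSet line)) (charSet l)

def buildGroupsAll_alt (lines : List String) : List (List String) :=
  let st := splitGroups lines
  (st.1 ++ (if st.2 = [] then [] else [st.2])).map groupAnswer

-- ===== PRECONDITION & SPEC =====
def Spec_buildGroupsAll (lines : List String) (out : List (List String)) : Prop := out = buildGroupsAll_alt lines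
instance (lines : List String) (out : List (List String)) : Decidable (Spec_buildGroupsAll lines out) := by unfold Spec_buildGroupsAll; infer_instance

-- ===== CLAIM (what is proved, stated in full; the proofs are below) =====
def Claim_equal_buildGroupsAll : Prop := ∀ (lines : List String), Dom_buildGroupsAll lines → Spec_buildGroupsAll lines (buildGroupsAll lines)

-- ===== LEMMAS AND PROOFS =====

-- A's current group, expressed through B's current group of raw lines
def optAns (cur : List String) : Option (List String) :=
  if cur = [] then none else some (groupAnswer cur)

-- removing every element of d from g is filtering g by non-membership in d
lemma foldl_discard (d g : List String) :
    d.foldl (fun g q => PySem.Set.discard g q) g = g.filter (fun y => !d.contains y) := by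
  induction d generalizing g with
  | nil => simp
  | cons x d ih =>
      rw [List.foldl_cons, ih]
      simp only [PySem.Set.discard, List.filter_filter]
      apply List.filter_congr
      intro y _
      simp only [List.contains_cons, Bool.not_or, Bool.and_comm]

-- A's removal loop over group.difference(person) is intersection with person
lemma removal_eq_inter (g t : List String) :
    (PySem.Set.diff g t).foldl (fun g q => PySem.Set.discard g q) g = PySem.Set.inter g t := by
  rw [foldl_discard]
  unfold PySem.Set.inter
  apply List.filter_congr
  intro y hy
  by_cases h : y ∈ t <;>
    simp [PySem.Set.diff, List.contains_eq_mem, List.mem_filter, hy, h]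

lemma inter_self_charSet (line : String) :
    (PySem.Set.diff (charSet line) (charSet line)).foldl (fun g q => PySem.Set.discard g q)
      (charSet line) = charSet line := by
  rw [removal_eq_inter]
  unfold PySem.Set.inter
  apply List.filter_eq_self.2
  intro y hy
  simpa [List.contains_eq_mem] using hy

-- the loop invariant: A's fold state is B's fold state viewed through groupAnswer/optAns
lemma inv (lines : List String) (gs : List (List String)) (cur : List String) :
    lines.foldl stepA (gs.map groupAnswer, optAns cur) =
      ((lines.foldl stepB (gs, cur)).1.map groupAnswer,
        optAns (lines.foldl stepB (gs, cur)).2) := by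
  induction lines generalizing gs cur with
  | nil => simp
  | cons line rest ih =>
      simp only [List.foldl_cons]
      by_cases hb : line = ""
      · subst hb
        by_cases hc : cur = []
        · subst hc
          simpa [stepA, stepB, optAns] using ih gs []
        · have h1 : stepA (gs.map groupAnswer, optAns cur) "" =
              ((gs ++ [cur]).map groupAnswer, optAns []) := by
            simp [stepA, optAns, hc]
          have h2 : stepB (gs, cur) "" = (gs ++ [cur], []) := by
            simp [stepB, hc]
          rw [h1, h2]
          exact ih (gs ++ [cur]) []
      · have h2 : stepB (gs, cur) line = (gs, cur ++ [line]) := by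
          simp [stepB, hb]
        have h1 : stepA (gs.map groupAnswer, optAns cur) line =
            (gs.map groupAnswer, optAns (cur ++ [line])) := by
          cases cur with
          | nil =>
              simp [stepA, optAns, hb, groupAnswer, inter_self_charSet]
          | cons l r =>
              simp only [stepA, if_neg hb, optAns, reduceIte, List.cons_append,
                List.cons_ne_nil, groupAnswer]
              rw [removal_eq_inter, List.foldl_append]
              simp
        rw [h1, h2]
        exact ih gs (cur ++ [line])

-- ===== VERDICT (by name: the statement is the Claim_ definition above) =====
theorem buildGroupsAll_spec : Claim_equal_buildGroupsAll := by
  intro lines _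
  unfold Spec_buildGroupsAll buildGroupsAll buildGroupsAll_alt splitGroups
  have h := inv lines [] []
  simp only [List.map_nil, optAns, reduceIte] at h
  rw [h]
  by_cases hc : (lines.foldl stepB ([], [])).2 = []
  · simp [hc]
  · simp [hc]
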